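-- pv_equiv track=rewrite | github.com/bandprotocol/python-client | pyband/key_manager.py | get_addr_from_hex
-- ===== SOURCE A (Python) =====
-- BASE_32_LOOKUP = 'ABCDEFGHJKLMNPQRSTUVWXYZ23456789'
--
-- def get_addr_from_hex(addr_hex):
--     addr_value = 0
--     for byte in bytes.fromhex(addr_hex):
--         addr_value = 256 * addr_value + byte
--
--     iban_rev_accounts = []
--     for byte_idx in range(32):
--         iban_rev_accounts.append(BASE_32_LOOKUP[addr_value % 32])
--         addr_value //= 32
--
--     iban_accounts = list(reversed(iban_rev_accounts))
--     checksum_value = 0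
--     for digit in iban_accounts + ['A', 'X']:
--         if '0' <= digit <= '9':
--             checksum_value = checksum_value * 10 + int(digit)
--         else:
--             checksum_value = checksum_value * 100 + 10 + ord(digit) - ord('A')
--
--     checksum_digits = 98 - (checksum_value * 100) % 97
--
--     return (
--         'AX' + str(checksum_digits).zfill(2) + ' ' +
--         ' '.join(''.join(iban_accounts[i * 4:i * 4 + 4]) for i in range(8)))
-- ===== SOURCE B (Python) =====
-- BASE_32_LOOKUP = 'ABCDEFGHJKLMNPQRSTUVWXYZ23456789'
-- HEX_DIGITS = '0123456789abcdef'
-- BASE_36_DIGITS = '0123456789ABCDEFGHIJKLMNOPQRSTUVWXYZ'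
--
-- def get_addr_from_hex(addr_hex):
--     v = 0
--     for c in addr_hex:
--         if not c.isspace():
--             v = 16 * v + HEX_DIGITS.index(c.lower())
--     accounts = ''.join(
--         BASE_32_LOOKUP[(v // 32 ** (31 - i)) % 32] for i in range(32))
--     r = 0
--     for c in accounts + 'AX':
--         d = BASE_36_DIGITS.index(c)
--         r = (r * (10 if d < 10 else 100) + d) % 97
--     checksum_digits = 98 - (r * 100) % 97
--     return ('AX' + str(checksum_digits).zfill(2) + ' ' +
--             ' '.join(accounts[i:i + 4] for i in range(0, 32, 4)))
-- ===== Notes on version B (the rewrite author's own statement) =====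
-- stated objective: alternative
-- what changed: B parses the hex per character (Horner, skipping whitespace) instead of via byte pairs, extracts the 32 base-32 digits by closed-form division instead of a stateful divmod loop plus reversal, and computes the IBAN checksum as a bounded streaming mod-97 residue over base-36 digit values instead of accumulating the full 68-digit integer.
import Mathlib
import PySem

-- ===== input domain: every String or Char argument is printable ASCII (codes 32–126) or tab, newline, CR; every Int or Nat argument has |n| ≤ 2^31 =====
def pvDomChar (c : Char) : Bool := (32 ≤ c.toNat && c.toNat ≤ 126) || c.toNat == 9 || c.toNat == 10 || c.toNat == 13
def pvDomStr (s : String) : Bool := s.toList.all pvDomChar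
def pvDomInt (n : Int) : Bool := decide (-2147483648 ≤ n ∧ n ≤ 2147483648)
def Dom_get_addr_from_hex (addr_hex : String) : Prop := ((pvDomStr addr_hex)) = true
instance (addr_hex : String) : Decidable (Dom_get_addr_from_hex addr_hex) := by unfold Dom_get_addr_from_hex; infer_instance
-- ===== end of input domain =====

set_option maxRecDepth 20000


-- B replaces A's byte-pair hex fold by a per-character Horner parse, A's stateful divmod
-- loop + reversal by closed-form digit extraction, and A's full-integer IBAN accumulator by
-- a streaming mod-97 residue over base-36 digit values (objective: alternative).

-- ===== PORT A =====
-- BASE_32_LOOKUP (shared module constant of both Pythons)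
def pvB32 : List Char :=
  ['A','B','C','D','E','F','G','H','J','K','L','M','N','P','Q','R','S','T','U','V','W','X','Y','Z',
   '2','3','4','5','6','7','8','9']

-- BASE_32_LOOKUP[i]: both Pythons index it only at i = value % 32 ∈ [0,32), so the default is never taken
def pvB32get (i : Int) : Char := (PySem.List.pyGet? pvB32 i).getD ' '

-- the hexadecimal digit characters Python accepts
def pvHex22 : List Char :=
  ['0','1','2','3','4','5','6','7','8','9','a','b','c','d','e','f','A','B','C','D','E','F']

-- value of one hex-digit character (exact on Pre_'s hex characters)
def pvHexVal (c : Char) : Int :=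
  if '0' ≤ c ∧ c ≤ '9' then (c.toNat : Int) - 48
  else if 'a' ≤ c then (c.toNat : Int) - 87
  else (c.toNat : Int) - 55

-- bytes.fromhex, ported by hand (whitespace is skipped between bytes): exact on Pre_'s inputs
def pvHexBytes : List Char → List Int
  | [] => []
  | c :: rest =>
    if PySem.Chars.isspace c then pvHexBytes rest
    else
      match rest with
      | c2 :: rest2 => (16 * pvHexVal c + pvHexVal c2) :: pvHexBytes rest2
      | [] => []

def get_addr_from_hex (addr_hex : String) : String :=
  let addr_value : Int := (pvHexBytes addr_hex.toList).foldl (fun a b => 256 * a + b) 0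
  let st := (PySem.List.pyRange 0 32 1).foldl
      (fun (st : List Char × Int) _ =>
        (st.1 ++ [pvB32get (PySem.Int.mod st.2 32)], PySem.Int.floordiv st.2 32))
      (([] : List Char), addr_value)
  let iban_accounts := st.1.reverse
  let checksum_value : Int := (iban_accounts ++ ['A', 'X']).foldl
      (fun cv d =>
        if '0' ≤ d ∧ d ≤ '9' then cv * 10 + (PySem.Int.ofChars? [d]).getD 0
        else cv * 100 + 10 + (d.toNat : Int) - 65)
      0
  let checksum_digits : Int := 98 - PySem.Int.mod (checksum_value * 100) 97
  String.ofList (['A','X'] ++ PySem.Chars.zfill (PySem.Int.toChars checksum_digits) 2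
      ++ [' ']
      ++ PySem.Chars.join [' ']
          ((PySem.List.pyRange 0 8 1).map (fun i =>
            PySem.List.slice iban_accounts (some (i * 4)) (some (i * 4 + 4)))))

-- ===== PORT B =====
-- HEX_DIGITS
def pvHexDigits : List Char := ['0','1','2','3','4','5','6','7','8','9','a','b','c','d','e','f']

-- BASE_36_DIGITS
def pvB36 : List Char :=
  ['0','1','2','3','4','5','6','7','8','9','A','B','C','D','E','F','G','H','I','J','K','L','M',
   'N','O','P','Q','R','S','T','U','V','W','X','Y','Z']

-- HEX_DIGITS.index(c.lower()); str.index never fails on Pre_'s hex characters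
def pvHexIdx (c : Char) : Int :=
  ((PySem.List.index? pvHexDigits (PySem.Chars.lowerChar c)).getD 0 : Nat)

def get_addr_from_hex_alt (addr_hex : String) : String :=
  let v : Int := addr_hex.toList.foldl
      (fun a c => if PySem.Chars.isspace c then a else 16 * a + pvHexIdx c) 0
  let accounts : List Char := (PySem.List.pyRange 0 32 1).map (fun i =>
      pvB32get (PySem.Int.mod (PySem.Int.floordiv v ((32:Int) ^ ((31 - i).toNat))) 32))
  let r : Int := (accounts ++ ['A', 'X']).foldl
      (fun r c =>
        let d : Int := ((PySem.List.index? pvB36 c).getD 0 : Nat)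
        PySem.Int.mod (r * (if d < 10 then 10 else 100) + d) 97)
      0
  let checksum_digits : Int := 98 - PySem.Int.mod (r * 100) 97
  String.ofList (['A','X'] ++ PySem.Chars.zfill (PySem.Int.toChars checksum_digits) 2
      ++ [' ']
      ++ PySem.Chars.join [' ']
          ((PySem.List.pyRange 0 32 4).map (fun i =>
            PySem.List.slice accounts (some i) (some (i + 4)))))

-- ===== PRECONDITION & SPEC =====
-- Pre_ is bytes.fromhex's accepted grammar: hex digits and whitespace, whitespace only at
-- byte boundaries (an even number of hex digits before it), and an even total digit count;
-- outside it A raises ValueError.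
def Pre_get_addr_from_hex (addr_hex : String) : Prop :=
  (addr_hex.toList.all fun c => decide (c ∈ pvHex22) || PySem.Chars.isspace c) = true ∧
  addr_hex.toList.countP (fun c => decide (c ∈ pvHex22)) % 2 = 0 ∧
  ∀ i < addr_hex.toList.length, PySem.Chars.isspace (addr_hex.toList.getD i ' ') = true →
      (addr_hex.toList.take i).countP (fun c => decide (c ∈ pvHex22)) % 2 = 0
instance (addr_hex : String) : Decidable (Pre_get_addr_from_hex addr_hex) := by
  unfold Pre_get_addr_from_hex; infer_instance

def pvWitness_get_addr_from_hex : String := "0aF3"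

def Spec_get_addr_from_hex (addr_hex : String) (out : String) : Prop := out = get_addr_from_hex_alt addr_hex
instance (addr_hex : String) (out : String) : Decidable (Spec_get_addr_from_hex addr_hex out) := by unfold Spec_get_addr_from_hex; infer_instance

-- ===== CLAIM (what is proved, stated in full; the proofs are below) =====
def Claim_equal_get_addr_from_hex : Prop := ∀ (addr_hex : String), Dom_get_addr_from_hex addr_hex → Pre_get_addr_from_hex addr_hex → Spec_get_addr_from_hex addr_hex (get_addr_from_hex addr_hex)

-- ===== LEMMAS AND PROOFS =====

-- hex characters: B's lowercase-index value equals A's arithmetic value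
theorem pvHexIdx_eq_val : ∀ c ∈ pvHex22, pvHexIdx c = pvHexVal c := by
  have h : (pvHex22.all fun c => decide (pvHexIdx c = pvHexVal c)) = true := by decide
  intro c hc
  exact of_decide_eq_true (List.all_eq_true.mp h c hc)

-- hex-digit characters are not whitespace
theorem pvHex22_not_space : ∀ c ∈ pvHex22, PySem.Chars.isspace c = false := by
  have h : (pvHex22.all fun c => decide (PySem.Chars.isspace c = false)) = true := by decide
  intro c hc
  exact of_decide_eq_true (List.all_eq_true.mp h c hc)

-- A's whitespace-skipping byte-pair fold equals B's whitespace-skipping Horner fold on Pre_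
theorem pv_hexfold (cs : List Char) :
    (∀ c ∈ cs, c ∈ pvHex22 ∨ PySem.Chars.isspace c = true) →
    cs.countP (fun c => decide (c ∈ pvHex22)) % 2 = 0 →
    (∀ i < cs.length, PySem.Chars.isspace (cs.getD i ' ') = true →
        (cs.take i).countP (fun c => decide (c ∈ pvHex22)) % 2 = 0) →
    ∀ a : Int,
    (pvHexBytes cs).foldl (fun x b => 256 * x + b) a
      = cs.foldl (fun x c => if PySem.Chars.isspace c then x else 16 * x + pvHexIdx c) a := by
  induction cs using pvHexBytes.induct with
  | case1 => intro _ _ _ a; rfl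
  | case2 c rest hsp ih =>
      intro hall heven hpre a
      have hcnot : (c ∈ pvHex22) = False := by
        by_contra h
        have hc : c ∈ pvHex22 := by simpa using h
        have := pvHex22_not_space c hc
        rw [this] at hsp; exact Bool.false_ne_true hsp
      have hstep : pvHexBytes (c :: rest) = pvHexBytes rest := by
        conv_lhs => rw [pvHexBytes.eq_def]
        simp [hsp]
      rw [hstep]
      simp only [List.foldl_cons, hsp, if_true]
      apply ih
      · exact fun x hx => hall x (List.mem_cons_of_mem _ hx)
      · simpa [List.countP_cons, hcnot] using heven
      · intro i hi hspi
        have h := hpre (i + 1) (by simp only [List.length_cons]; omega)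
          (by simpa using hspi)
        simpa [List.countP_cons, hcnot] using h
  | case3 c hnsp c2 rest2 ih =>
      intro hall heven hpre a
      have hc : c ∈ pvHex22 := by
        rcases hall c List.mem_cons_self with h | h
        · exact h
        · exact absurd h (by simpa using hnsp)
      have hc2nsp : PySem.Chars.isspace c2 = false := by
        by_contra h
        have hsp2 : PySem.Chars.isspace c2 = true := by
          cases hx : PySem.Chars.isspace c2
          · exact absurd hx h
          · rfl
        have h1 := hpre 1 (by simp only [List.length_cons]; omega) (by simpa using hsp2)
        simp [List.countP_cons, hc] at h1
      have hc2 : c2 ∈ pvHex22 := by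
        rcases hall c2 (List.mem_cons_of_mem _ List.mem_cons_self) with h | h
        · exact h
        · rw [hc2nsp] at h; exact absurd h (by simp)
      have hcns : PySem.Chars.isspace c = false := by
        cases hx : PySem.Chars.isspace c
        · rfl
        · exact absurd hx hnsp
      have hstep : pvHexBytes (c :: c2 :: rest2)
          = (16 * pvHexVal c + pvHexVal c2) :: pvHexBytes rest2 := by
        conv_lhs => rw [pvHexBytes.eq_def]
        simp [hcns]
      rw [hstep]
      simp only [List.foldl_cons, hcns, hc2nsp, Bool.false_eq_true, if_false]
      rw [ih (fun x hx => hall x (List.mem_cons_of_mem _ (List.mem_cons_of_mem _ hx)))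
            (by simp only [List.countP_cons, hc, hc2, decide_true, if_true] at heven ⊢; omega)
            (fun i hi hspi => by
              have h := hpre (i + 2) (by simp only [List.length_cons]; omega)
                (by simpa using hspi)
              simp [List.countP_cons, hc, hc2] at h
              omega)]
      congr 1
      rw [pvHexIdx_eq_val c hc, pvHexIdx_eq_val c2 hc2]
      ring
  | case4 c hnsp =>
      intro hall heven _ a
      have hc : c ∈ pvHex22 := by
        rcases hall c List.mem_cons_self with h | h
        · exact h
        · exact absurd h (by simpa using hnsp)
      simp [List.countP_cons, hc] at heven

-- a fold whose body ignores the list element is an iterate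
theorem pv_foldl_const {α β : Type} (f : α → α) (l : List β) (st : α) :
    l.foldl (fun s _ => f s) st = f^[l.length] st := by
  induction l generalizing st with
  | nil => rfl
  | cons b l ih => simp [List.foldl_cons, ih, Function.iterate_succ_apply]

theorem pv_fd_fd (w : Int) (j : Nat) :
    PySem.Int.floordiv (PySem.Int.floordiv w 32) ((32:Int)^j) = PySem.Int.floordiv w ((32:Int)^(j+1)) := by
  rw [PySem.Int.floordiv_eq_ediv_of_pos (by norm_num : (0:Int) < 32),
      PySem.Int.floordiv_eq_ediv_of_pos (by positivity : (0:Int) < (32:Int)^j),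
      PySem.Int.floordiv_eq_ediv_of_pos (by positivity : (0:Int) < (32:Int)^(j+1)),
      Int.ediv_ediv_eq_ediv_mul (by norm_num), ← pow_succ']

theorem pv_fd_one (w : Int) : PySem.Int.floordiv w 1 = w := by
  rw [PySem.Int.floordiv_eq_ediv_of_pos (by norm_num : (0:Int) < 1), Int.ediv_one]

-- A's divmod loop, characterised in closed form
theorem pv_iterA (n : Nat) (acc : List Char) (w : Int) :
    ((fun (st : List Char × Int) =>
        (st.1 ++ [pvB32get (PySem.Int.mod st.2 32)], PySem.Int.floordiv st.2 32))^[n] (acc, w))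
      = (acc ++ (List.range n).map
            (fun j => pvB32get (PySem.Int.mod (PySem.Int.floordiv w ((32:Int) ^ j)) 32)),
         PySem.Int.floordiv w ((32:Int) ^ n)) := by
  induction n generalizing acc w with
  | zero => simp only [Function.iterate_zero, id_eq, List.range_zero, List.map_nil,
      List.append_nil, pow_zero, pv_fd_one w]
  | succ n ih =>
      rw [Function.iterate_succ_apply, ih]
      refine Prod.ext ?_ ?_
      · rw [List.range_succ_eq_map]
        simp only [List.map_cons, List.map_map, List.append_assoc, List.singleton_append,
          pow_zero, pv_fd_one]
        congr 2
        apply List.map_congr_left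
        intro j _
        simp only [Function.comp_apply, Nat.succ_eq_add_one]
        rw [pv_fd_fd w j]
      · rw [pv_fd_fd w n]

-- the base-32 lookup of a mod-32 value is a base-32 character
theorem pvB32get_mem (x : Int) : pvB32get (PySem.Int.mod x 32) ∈ pvB32 := by
  have h32 : (0:Int) < 32 := by norm_num
  have hm : PySem.Int.mod x 32 = x % 32 := PySem.Int.mod_eq_emod_of_pos h32
  have h0 : 0 ≤ x % 32 := Int.emod_nonneg x (by norm_num)
  have h1 : x % 32 < 32 := Int.emod_lt_of_pos x h32
  unfold pvB32get
  rw [hm, PySem.List.pyGet?_of_nonneg _ h0]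
  have hlt : (x % 32).toNat < pvB32.length := by
    simp only [pvB32]; simp; omega
  rw [List.getElem?_eq_getElem hlt]
  exact List.getElem_mem _

-- per-character agreement of the two checksum steps on base-32 characters
theorem pv_stepfact : ∀ c ∈ pvB32,
    ((if (((PySem.List.index? pvB36 c).getD 0 : Nat) : Int) < 10 then (10:Int) else 100)
        = (if '0' ≤ c ∧ c ≤ '9' then 10 else 100)) ∧
    ((((PySem.List.index? pvB36 c).getD 0 : Nat) : Int)
        = (if '0' ≤ c ∧ c ≤ '9' then (PySem.Int.ofChars? [c]).getD 0
           else 10 + (c.toNat : Int) - 65)) := by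
  have h : (pvB32.all fun c => decide (
    ((if (((PySem.List.index? pvB36 c).getD 0 : Nat) : Int) < 10 then (10:Int) else 100)
        = (if '0' ≤ c ∧ c ≤ '9' then 10 else 100)) ∧
    ((((PySem.List.index? pvB36 c).getD 0 : Nat) : Int)
        = (if '0' ≤ c ∧ c ≤ '9' then (PySem.Int.ofChars? [c]).getD 0
           else 10 + (c.toNat : Int) - 65)))) = true := by decide
  intro c hc
  exact of_decide_eq_true (List.all_eq_true.mp h c hc)

-- B's streaming residue tracks A's full accumulator modulo 97
theorem pv_checksum (ds : List Char) (hd : ∀ c ∈ ds, c ∈ pvB32) (cv r : Int)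
    (hr : r = cv % 97) :
    ds.foldl (fun r c =>
        let d : Int := ((PySem.List.index? pvB36 c).getD 0 : Nat)
        PySem.Int.mod (r * (if d < 10 then 10 else 100) + d) 97) r
      = (ds.foldl (fun cv d =>
          if '0' ≤ d ∧ d ≤ '9' then cv * 10 + (PySem.Int.ofChars? [d]).getD 0
          else cv * 100 + 10 + (d.toNat : Int) - 65) cv) % 97 := by
  induction ds generalizing cv r with
  | nil => simpa using hr
  | cons c ds ih =>
      simp only [List.foldl_cons]
      apply ih (fun x hx => hd x (List.mem_cons_of_mem _ hx))
      obtain ⟨h1, h2⟩ := pv_stepfact c (hd c List.mem_cons_self)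
      rw [PySem.Int.mod_eq_emod_of_pos (by norm_num : (0:Int) < 97)]
      simp only [h1]; simp only [h2, hr]
      split_ifs with h
      · omega
      · omega

-- ===== VERDICT (by name: the statement is the Claim_ definition above) =====
theorem get_addr_from_hex_spec : Claim_equal_get_addr_from_hex := by
  intro s _ hpre
  obtain ⟨hallb, heven, hpre2⟩ := hpre
  have hall : ∀ c ∈ s.toList, c ∈ pvHex22 ∨ PySem.Chars.isspace c = true := by
    intro c hc
    have := List.all_eq_true.mp hallb c hc
    simpa using this
  show get_addr_from_hex s = get_addr_from_hex_alt s
  simp only [get_addr_from_hex, get_addr_from_hex_alt]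
  rw [pv_hexfold s.toList hall heven hpre2 0]
  rw [pv_foldl_const, (show ((PySem.List.pyRange 0 32 1 : List Int)).length = 32 by decide),
      pv_iterA 32 []]
  simp only [List.nil_append]
  set v := List.foldl (fun x c => if PySem.Chars.isspace c then x else 16 * x + pvHexIdx c) 0
      s.toList with hv
  have hacc : ((List.range 32).map
        (fun j => pvB32get (PySem.Int.mod (PySem.Int.floordiv v ((32:Int)^j)) 32))).reverse
      = (PySem.List.pyRange 0 32 1).map
        (fun i => pvB32get (PySem.Int.mod (PySem.Int.floordiv v ((32:Int) ^ ((31 - i).toNat))) 32)) := by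
    rw [PySem.List.pyRange_one, List.map_map]
    apply List.ext_getElem
    · simp
    · intro i hi1 hi2
      simp only [List.length_reverse, List.length_map, List.length_range] at hi1
      rw [List.getElem_reverse]
      simp only [List.length_map, List.length_range, List.getElem_map, List.getElem_range,
        Function.comp_apply]
      have he : (31 - ((0:Int) + (i:Int))).toNat = 32 - 1 - i := by omega
      rw [he]
  rw [hacc]
  set L := (PySem.List.pyRange 0 32 1).map
        (fun i => pvB32get (PySem.Int.mod (PySem.Int.floordiv v ((32:Int) ^ ((31 - i).toNat))) 32)) with hL
  have hmem : ∀ c ∈ L ++ ['A', 'X'], c ∈ pvB32 := by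
    intro c hc
    rcases List.mem_append.mp hc with hc | hc
    · rw [hL] at hc
      obtain ⟨j, -, rfl⟩ := List.mem_map.mp hc
      exact pvB32get_mem _
    · have hAX : c = 'A' ∨ c = 'X' := by simpa using hc
      rcases hAX with rfl | rfl <;> decide
  rw [pv_checksum (L ++ ['A','X']) hmem 0 0 (by norm_num)]
  have hmod : ∀ cv : Int, PySem.Int.mod (cv % 97 * 100) 97 = PySem.Int.mod (cv * 100) 97 := by
    intro cv
    rw [PySem.Int.mod_eq_emod_of_pos (by norm_num : (0:Int) < 97),
        PySem.Int.mod_eq_emod_of_pos (by norm_num : (0:Int) < 97)]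
    omega
  rw [hmod]
  have hsl : (PySem.List.pyRange 0 8 1).map
        (fun i => PySem.List.slice L (some (i * 4)) (some (i * 4 + 4)))
      = (PySem.List.pyRange 0 32 4).map (fun i => PySem.List.slice L (some i) (some (i + 4))) := by
    rw [show PySem.List.pyRange 0 8 1 = [0,1,2,3,4,5,6,7] from by decide,
        show PySem.List.pyRange 0 32 4 = [0,4,8,12,16,20,24,28] from by decide]
    simp only [List.map_cons, List.map_nil]
    norm_num
  rw [hsl]
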